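-- pv_equiv track=rewrite | github.com/leobitz/DistillEmb | lib.py | word2ids
-- ===== SOURCE A (Python) =====
-- def word2ids(char2int, word, pad_char, max_len):
--         if len(word) > max_len:
--             word = word[:max_len]
--
--         ids =  [char2int[c] for c in word]
--         n_pad = (max_len - len(ids)) // 2
--         pad = [char2int[pad_char]] * n_pad
--         ids = pad + ids + pad
--         ids = ids + [char2int[pad_char]] * (max_len - len(ids))
--         return ids
-- ===== SOURCE B (Python) =====
-- def word2ids(char2int, word, pad_char, max_len):
--     w = word[:max_len]
--     start = (max_len - len(w)) // 2
--     end = start + len(w)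
--     return [char2int[w[j - start]] if start <= j < end else char2int[pad_char]
--             for j in range(max_len)]
-- ===== Notes on version B (the rewrite author's own statement) =====
-- stated objective: alternative
-- what changed: B is a gather: one comprehension over output positions range(max_len) that selects, per position, either the dict id of the word character at offset j-start or the pad id, instead of A's scatter-style construction by mapping the word and concatenating pad lists around it.
-- outside the precondition, e.g. on word2ids({'a': 1, 'p': 0}, 'ab', 'p', -1): A returns [1], B returns []
import Mathlib
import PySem

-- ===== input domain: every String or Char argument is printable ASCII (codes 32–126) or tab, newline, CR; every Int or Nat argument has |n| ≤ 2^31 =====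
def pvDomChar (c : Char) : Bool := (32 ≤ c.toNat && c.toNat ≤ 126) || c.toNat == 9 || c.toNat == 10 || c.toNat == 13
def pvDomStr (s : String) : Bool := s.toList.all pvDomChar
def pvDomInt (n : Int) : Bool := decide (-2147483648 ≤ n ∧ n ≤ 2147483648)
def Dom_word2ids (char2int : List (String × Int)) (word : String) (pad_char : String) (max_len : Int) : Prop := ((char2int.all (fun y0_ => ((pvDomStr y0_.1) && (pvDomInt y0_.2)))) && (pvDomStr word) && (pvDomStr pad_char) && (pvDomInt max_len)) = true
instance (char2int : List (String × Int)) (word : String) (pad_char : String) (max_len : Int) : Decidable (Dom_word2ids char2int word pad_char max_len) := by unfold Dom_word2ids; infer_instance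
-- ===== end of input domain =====

-- B computes each output position independently by a gather over range(max_len) (word char id
-- at j-start, else pad id) instead of A's concatenation of pad lists around the mapped word
-- (alternative decomposition, same cost; return value only).

-- ===== PORT A =====
def word2ids (char2int : List (String × Int)) (word : String) (pad_char : String) (max_len : Int) : List Int :=
  let w := if (word.toList.length : Int) > max_len then PySem.Str.slice word none (some max_len) else word
  let ids := w.toList.map (fun c => (PySem.Dict.mk char2int).getD (String.ofList [c]) 0)
  let n_pad := PySem.Int.floordiv (max_len - ids.length) 2
  let pad := List.replicate n_pad.toNat ((PySem.Dict.mk char2int).getD pad_char 0)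
  let ids2 := pad ++ ids ++ pad
  ids2 ++ List.replicate (max_len - ids2.length).toNat ((PySem.Dict.mk char2int).getD pad_char 0)

-- ===== PORT B =====
def word2ids_alt (char2int : List (String × Int)) (word : String) (pad_char : String) (max_len : Int) : List Int :=
  let w := (PySem.Str.slice word none (some max_len)).toList
  let start := PySem.Int.floordiv (max_len - w.length) 2
  let stop := start + w.length
  (PySem.List.pyRange 0 max_len 1).map (fun j =>
    if start ≤ j ∧ j < stop then
      (PySem.Dict.mk char2int).getD (String.ofList [PySem.List.pyGetD w (j - start) ' ']) 0
    else (PySem.Dict.mk char2int).getD pad_char 0)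

-- ===== PRECONDITION & SPEC =====
-- Pre_ excludes inputs where A raises KeyError (a character of the truncated word, or pad_char,
-- missing from char2int) and negative max_len with a word longer than -max_len, outside the
-- natural domain of a width parameter (there A returns a truncated unpadded list, an accident of
-- Python's negative slicing, while B's empty range yields []; for shorter words both return []
-- and Pre_ admits them).
def Pre_word2ids (char2int : List (String × Int)) (word : String) (pad_char : String) (max_len : Int) : Prop :=
  (0 ≤ max_len ∨ (word.toList.length : Int) ≤ -max_len) ∧ (PySem.Dict.mk char2int).contains pad_char = true ∧
  (word.toList.take max_len.toNat).all (fun c => (PySem.Dict.mk char2int).contains (String.ofList [c])) = true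
instance (char2int : List (String × Int)) (word : String) (pad_char : String) (max_len : Int) : Decidable (Pre_word2ids char2int word pad_char max_len) := by unfold Pre_word2ids; infer_instance

def pvWitness_word2ids : (List (String × Int)) × String × String × Int := ([("a", 1), ("b", 2), ("_", 0)], "ab", "_", 5)

def Spec_word2ids (char2int : List (String × Int)) (word : String) (pad_char : String) (max_len : Int) (out : List Int) : Prop := out = word2ids_alt char2int word pad_char max_len
instance (char2int : List (String × Int)) (word : String) (pad_char : String) (max_len : Int) (out : List Int) : Decidable (Spec_word2ids char2int word pad_char max_len out) := by unfold Spec_word2ids; infer_instance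

-- ===== CLAIM (what is proved, stated in full; the proofs are below) =====
def Claim_equal_word2ids : Prop := ∀ (char2int : List (String × Int)) (word : String) (pad_char : String) (max_len : Int), Dom_word2ids char2int word pad_char max_len → Pre_word2ids char2int word pad_char max_len → Spec_word2ids char2int word pad_char max_len (word2ids char2int word pad_char max_len)

-- ===== LEMMAS AND PROOFS =====

-- B's per-position gather over range(m) equals pad ++ mapped word ++ pad.
theorem pv_gather_eq (p : Int) (g : Char → Int) (ws : List Char) (s m : Nat)
    (h : s + ws.length ≤ m) :
    List.map
      ((fun j : Int =>
          if (s : Int) ≤ j ∧ j < (s : Int) + (ws.length : Int) then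
            g (PySem.List.pyGetD ws (j - (s : Int)) ' ')
          else p) ∘ (fun k : Nat => (k : Int)))
      (List.range m)
    = List.replicate s p ++ (ws.map g ++ List.replicate (m - s - ws.length) p) := by
  apply List.ext_getElem
  · simp; omega
  · intro i hi1 hi2
    simp only [List.getElem_map, List.getElem_range, Function.comp,
      List.getElem_append, List.length_replicate, List.length_map]
    have hm : i < m := by simpa using hi1
    by_cases h1 : i < s
    · rw [if_neg (by omega), dif_pos h1, List.getElem_replicate]
    · by_cases h2 : i < s + ws.length
      · rw [if_pos (by constructor <;> omega), dif_neg h1, dif_pos (by omega)]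
        have hcast : (i : Int) - (s : Int) = ((i - s : Nat) : Int) := by omega
        rw [hcast, PySem.List.pyGetD_natCast, List.getD_eq_getElem _ _ (by omega)]
      · rw [if_neg (by omega), dif_neg h1, dif_neg (by omega), List.getElem_replicate]

theorem word2ids_spec : Claim_equal_word2ids := by
  intro char2int word pad_char max_len _ hpre
  obtain ⟨hm0, _, _⟩ := hpre
  unfold Spec_word2ids word2ids word2ids_alt
  dsimp only
  by_cases hm : 0 ≤ max_len
  case neg =>
    -- negative max_len admitted by Pre_ only when the sliced word is empty: both sides are []
    have hshort : (word.toList.length : Int) ≤ -max_len := by tauto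
    obtain ⟨k, hk, hkpos⟩ : ∃ k : Nat, max_len = -(k : Int) ∧ 0 < k := ⟨(-max_len).toNat, by omega, by omega⟩
    subst hk
    have h2' : word.toList.length ≤ k := by omega
    have h2 : word.length ≤ k := by simpa using h2'
    have hsl : (PySem.Str.slice word none (some (-(k:Int)))).toList = [] := by
      simp [PySem.Str.slice, PySem.List.slice_to_neg_natCast _ _ hkpos]
      omega
    rw [if_pos (show (-(k:Int)) < (word.toList.length : Int) by omega)]
    rw [hsl]
    have h1 : ((-(k:Int))).toNat = 0 := by omega
    have h2 : ((-(k:Int)) / 2).toNat = 0 := by omega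
    rw [PySem.List.pyRange_one_eq_nil (by omega)]
    simp [h1, h2]
  set d := PySem.Dict.mk char2int with hd
  set p := d.getD pad_char 0 with hp
  set g : Char → Int := fun c => d.getD (String.ofList [c]) 0 with hg
  obtain ⟨m, hmm⟩ : ∃ m : Nat, max_len = (m : Int) := ⟨max_len.toNat, (Int.toNat_of_nonneg hm).symm⟩
  subst hmm
  -- both truncations are `take m`
  have hslice : (PySem.Str.slice word none (some (m : Int))).toList = word.toList.take m := by
    simp [PySem.Str.slice, PySem.List.slice_to_natCast]
  have htrunc :
      (if (word.toList.length : Int) > (m : Int) then PySem.Str.slice word none (some (m : Int)) else word).toList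
      = word.toList.take m := by
    split_ifs with h
    · exact hslice
    · rw [List.take_of_length_le (by exact_mod_cast not_lt.mp h)]
  rw [htrunc, hslice]
  set ws := word.toList.take m with hws
  have hL : ws.length ≤ m := by simp [hws]
  set L := ws.length with hLdef
  -- the centre offset
  have hfd : PySem.Int.floordiv ((m : Int) - (L : Int)) 2 = (((m - L) / 2 : Nat) : Int) := by
    have : (m : Int) - (L : Int) = ((m - L : Nat) : Int) := by omega
    rw [this]; exact_mod_cast PySem.Int.floordiv_natCast (m - L) 2
  set s := (m - L) / 2 with hs
  have hs2 : 2 * s + L ≤ m := by omega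
  -- A's value
  have hlen2 : ((m : Int) - ((List.replicate s p ++ ws.map g ++ List.replicate s p).length : Int)).toNat
      = m - 2 * s - L := by
    simp [List.length_append, ← hLdef]; omega
  have hA : List.replicate s p ++ ws.map g ++ List.replicate s p ++ List.replicate (m - 2 * s - L) p
      = List.replicate s p ++ ws.map g ++ List.replicate (m - s - L) p := by
    rw [List.append_assoc (List.replicate s p ++ ws.map g), List.replicate_append_replicate]
    congr 2
    omega
  simp only [List.length_map, ← hLdef, hfd, Int.toNat_natCast] at hlen2 ⊢
  rw [hlen2, hA]
  -- B's value: rewrite pyRange to List.range and apply the gather lemma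
  rw [PySem.List.pyRange_one]
  norm_num
  exact (pv_gather_eq p g ws s m (by omega)).symm
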